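-- pv_equiv track=rewrite | github.com/EnochYing/BimImageNet | RevitViewCapture/App_postProcessing/utils.py | calculateObjPartMasks
-- ===== SOURCE A (Python) =====
-- def calculateObjPartMasks(annotations):
--     objPartInst_mask = {}
--     for i, row in enumerate(annotations):
--         for j, col in enumerate(row):
--             pieces = col.split('/')
--             for piece in pieces:
--                 if piece in objPartInst_mask.keys():
--                     objPartInst_mask[piece].append([i, j])
--                 else:
--                     objPartInst_mask[piece] = [[i, j]]
--
--     return objPartInst_mask
-- ===== SOURCE B (Python) =====
-- def calculateObjPartMasks(annotations):
--     occ = [(piece, [i, j])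
--            for i, row in enumerate(annotations)
--            for j, col in enumerate(row)
--            for piece in col.split('/')]
--     keys = list(dict.fromkeys(p for p, _ in occ))
--     return {p: [c for q, c in occ if q == p] for p in keys}
-- ===== Notes on version B (the rewrite author's own statement) =====
-- stated objective: alternative
-- what changed: A builds the dict incrementally with a membership test and append/insert per piece; B first flattens everything into one list of (piece,[i,j]) occurrences, takes the distinct labels in first-occurrence order, and builds each label's coordinate list by a per-label filter of the occurrence list.
import Mathlib
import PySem

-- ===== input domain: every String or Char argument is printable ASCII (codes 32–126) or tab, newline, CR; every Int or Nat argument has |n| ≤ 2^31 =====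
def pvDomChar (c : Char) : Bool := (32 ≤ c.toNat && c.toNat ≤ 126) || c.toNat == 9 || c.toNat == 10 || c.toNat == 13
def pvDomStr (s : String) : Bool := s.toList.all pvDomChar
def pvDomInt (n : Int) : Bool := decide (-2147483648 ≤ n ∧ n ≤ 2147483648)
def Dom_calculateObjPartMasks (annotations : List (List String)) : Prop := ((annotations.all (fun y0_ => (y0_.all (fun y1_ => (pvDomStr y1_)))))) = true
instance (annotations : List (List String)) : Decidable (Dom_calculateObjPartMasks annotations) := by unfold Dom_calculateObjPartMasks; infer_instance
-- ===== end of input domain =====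

-- B replaces A's incremental dict building (membership test + append/insert per piece) with a
-- flatten-then-group decomposition: one comprehension listing all (piece, [i,j]) occurrences,
-- the ordered key set, and a per-key filter; objective: alternative structure, not speed.

-- col.split('/'): the separator is the literal non-empty "/", so split? always returns some
def pvSplitSlash (col : String) : List String := (PySem.Str.split? col "/").getD []

-- ===== PORT A =====
def calculateObjPartMasks (annotations : List (List String)) : List (String × List (List Int)) :=
  let d : PySem.Dict String (List (List Int)) :=
    (PySem.List.enumerate annotations 0).foldl (fun d ir =>
      (PySem.List.enumerate ir.2 0).foldl (fun d jc =>
        (pvSplitSlash jc.2).foldl (fun d piece =>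
          if d.contains piece then d.modify piece [] (fun v => v ++ [[ir.1, jc.1]])
          else d.insert piece [[ir.1, jc.1]]) d) d) PySem.Dict.empty
  d.items

-- ===== PORT B =====
def calculateObjPartMasks_alt (annotations : List (List String)) : List (String × List (List Int)) :=
  let occ : List (String × List Int) :=
    (PySem.List.enumerate annotations 0).flatMap (fun ir =>
      (PySem.List.enumerate ir.2 0).flatMap (fun jc =>
        (pvSplitSlash jc.2).map (fun piece => (piece, [ir.1, jc.1]))))
  let keys := PySem.List.dedup (occ.map (·.1))
  keys.map (fun p => (p, ((occ.filter (fun q => q.1 == p)).map (·.2))))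

-- ===== PRECONDITION & SPEC =====
def Spec_calculateObjPartMasks (annotations : List (List String)) (out : List (String × List (List Int))) : Prop := out = calculateObjPartMasks_alt annotations
instance (annotations : List (List String)) (out : List (String × List (List Int))) : Decidable (Spec_calculateObjPartMasks annotations out) := by unfold Spec_calculateObjPartMasks; infer_instance

-- ===== CLAIM (what is proved, stated in full; the proofs are below) =====
def Claim_equal_calculateObjPartMasks : Prop := ∀ (annotations : List (List String)), Dom_calculateObjPartMasks annotations → Spec_calculateObjPartMasks annotations (calculateObjPartMasks annotations)

-- ===== LEMMAS AND PROOFS =====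

-- A's branch (append if present, insert otherwise) is exactly Dict.modify with default []
theorem pvStep_eq_modify (d : PySem.Dict String (List (List Int))) (p : String) (c : List Int) :
    (if d.contains p then d.modify p [] (fun v => v ++ [c]) else d.insert p [c])
      = d.modify p [] (fun v => v ++ [c]) := by
  by_cases h : d.contains p
  · simp [h]
  · simp only [Bool.not_eq_true] at h
    simp [h, PySem.Dict.modify, PySem.Dict.getD_of_not_contains d [] h]

theorem calculateObjPartMasks_spec' (annotations : List (List String)) :
    calculateObjPartMasks annotations = calculateObjPartMasks_alt annotations := by
  unfold calculateObjPartMasks calculateObjPartMasks_alt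
  set occ : List (String × List Int) :=
    (PySem.List.enumerate annotations 0).flatMap (fun ir =>
      (PySem.List.enumerate ir.2 0).flatMap (fun jc =>
        (pvSplitSlash jc.2).map (fun piece => (piece, [ir.1, jc.1])))) with hocc
  have hA : ((PySem.List.enumerate annotations 0).foldl (fun d ir =>
      (PySem.List.enumerate ir.2 0).foldl (fun d jc =>
        (pvSplitSlash jc.2).foldl (fun d piece =>
          if d.contains piece then d.modify piece [] (fun v => v ++ [[ir.1, jc.1]])
          else d.insert piece [[ir.1, jc.1]]) d) d)
      (PySem.Dict.empty : PySem.Dict String (List (List Int))))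
      = occ.foldl (fun d p => d.modify p.1 [] (fun v => v ++ [p.2])) PySem.Dict.empty := by
    rw [hocc]
    simp only [List.foldl_flatMap, List.foldl_map, pvStep_eq_modify]
  simp only [hA]
  set D := occ.foldl (fun d p => d.modify p.1 [] (fun v => v ++ [p.2]))
      (PySem.Dict.empty : PySem.Dict String (List (List Int))) with hD
  have hkeys : D.keys = PySem.List.dedup (occ.map (·.1)) := by
    rw [hD]
    rw [PySem.Dict.keys_foldl_modify_key occ Prod.fst [] (fun _ p => (· ++ [p.2]))]
    simp [PySem.Set.update, PySem.Dict.keys_empty, ← PySem.Set.ofList_eq_foldl]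
  have hnd : D.keys.Nodup := by
    rw [hD]
    exact PySem.Dict.nodup_keys_foldl_modify_key occ Prod.fst [] (fun _ p => (· ++ [p.2])) _
      (by simp [PySem.Dict.keys_empty])
  rw [PySem.Dict.items_eq_map_keys D hnd [], hkeys]
  refine List.map_congr_left (fun p _ => ?_)
  rw [hD, PySem.Dict.getD_foldl_modify_append]
  simp [PySem.Dict.getD_empty]

-- ===== VERDICT (by name: the statement is the Claim_ definition above) =====
theorem calculateObjPartMasks_spec : Claim_equal_calculateObjPartMasks := by
  intro annotations _
  exact calculateObjPartMasks_spec' annotations
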